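-- pv_equiv track=rewrite | github.com/tuckerdarby/connect4 | rankers.py | rank_array
-- ===== SOURCE A (Python) =====
-- def rank_array(arr, player):
--     ranks = []
--     current_count = 0
--     for i in range(len(arr)):
--         if arr[i] == player:
--             current_count += 1
--         else:
--             if current_count > 1:
--                 ranks.append(current_count)
--             current_count = 0
--     if current_count > 1:
--         ranks.append(current_count)
--     return ranks
-- ===== SOURCE B (Python) =====
-- def rank_array(arr, player):
--     ranks = []
--     i, n = 0, len(arr)
--     while i < n:
--         if arr[i] != player:
--             i += 1
--             continue
--         j = i + 1
--         while j < n and arr[j] == player: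
--             j += 1
--         if j - i > 1:
--             ranks.append(j - i)
--         i = j
--     return ranks
-- ===== Notes on version B (the rewrite author's own statement) =====
-- stated objective: alternative
-- what changed: Replaces A's per-element counter/reset state machine with a run-skipping two-pointer pass: scan to a player's element, advance a second index over the whole maximal run, emit its length if > 1, and jump past the run.
import Mathlib
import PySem

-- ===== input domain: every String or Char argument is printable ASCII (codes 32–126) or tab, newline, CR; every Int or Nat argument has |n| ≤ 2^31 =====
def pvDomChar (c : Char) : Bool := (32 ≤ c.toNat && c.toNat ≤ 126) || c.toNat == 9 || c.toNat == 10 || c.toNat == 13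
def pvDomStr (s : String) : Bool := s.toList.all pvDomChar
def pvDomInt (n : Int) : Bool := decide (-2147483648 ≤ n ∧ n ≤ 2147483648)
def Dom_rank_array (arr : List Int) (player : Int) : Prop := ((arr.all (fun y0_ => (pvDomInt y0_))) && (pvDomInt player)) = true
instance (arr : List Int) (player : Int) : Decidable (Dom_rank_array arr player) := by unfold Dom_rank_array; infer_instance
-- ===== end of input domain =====

-- B replaces A's per-element counter/reset state machine by a two-pointer run-skipping scan (alternative decomposition, same cost).


-- ===== PORT A =====
-- for i in range(len(arr)): arr[i] is always in range, so pyGetD's default 0 is never used (exact).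
def rank_array (arr : List Int) (player : Int) : List Int :=
  let st := (PySem.List.pyRange 0 (arr.length : Int) 1).foldl
    (fun (st : List Int × Int) i =>
      if PySem.List.pyGetD arr i 0 = player then (st.1, st.2 + 1)
      else (if st.2 > 1 then st.1 ++ [st.2] else st.1, 0))
    ([], 0)
  if st.2 > 1 then st.1 ++ [st.2] else st.1

-- ===== PORT B =====
-- inner while loop: advance j over the run of `player` elements
def altInner (arr : List Int) (player : Int) (j : Nat) : Nat :=
  if h : j < arr.length then
    if arr[j] = player then altInner arr player (j + 1) else j
  else j
termination_by arr.length - j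

-- used by altGo's termination only
theorem altInner_ge (arr : List Int) (player : Int) (j : Nat) : j ≤ altInner arr player j := by
  fun_induction altInner arr player j <;> omega

-- outer while loop of Source B
def altGo (arr : List Int) (player : Int) (i : Nat) (ranks : List Int) : List Int :=
  if h : i < arr.length then
    if arr[i] ≠ player then altGo arr player (i + 1) ranks
    else
      let j := altInner arr player (i + 1)
      altGo arr player j
        (ranks ++ (if (j : Int) - (i : Int) > 1 then [(j : Int) - (i : Int)] else []))
  else ranks
termination_by arr.length - i
decreasing_by
  · omega
  · have := altInner_ge arr player (i + 1); omega

def rank_array_alt (arr : List Int) (player : Int) : List Int :=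
  altGo arr player 0 []

-- ===== PRECONDITION & SPEC =====
def Spec_rank_array (arr : List Int) (player : Int) (out : List Int) : Prop := out = rank_array_alt arr player
instance (arr : List Int) (player : Int) (out : List Int) : Decidable (Spec_rank_array arr player out) := by unfold Spec_rank_array; infer_instance

-- ===== CLAIM (what is proved, stated in full; the proofs are below) =====
def Claim_equal_rank_array : Prop := ∀ (arr : List Int) (player : Int), Dom_rank_array arr player → Spec_rank_array arr player (rank_array arr player)

-- ===== LEMMAS AND PROOFS =====

-- the list of run lengths > 1 still to be emitted, given a pending count c
def runH (player : Int) : Int → List Int → List Int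
  | c, [] => if c > 1 then [c] else []
  | c, x :: xs => if x = player then runH player (c + 1) xs
                  else (if c > 1 then [c] else []) ++ runH player 0 xs

def finishA (st : List Int × Int) : List Int := if st.2 > 1 then st.1 ++ [st.2] else st.1

theorem foldl_eq_runH (player : Int) (xs : List Int) : ∀ (r : List Int) (c : Int),
    finishA (xs.foldl (fun (st : List Int × Int) (x : Int) =>
        if x = player then (st.1, st.2 + 1)
        else (if st.2 > 1 then st.1 ++ [st.2] else st.1, 0)) (r, c))
    = r ++ runH player c xs := by
  induction xs with
  | nil => intro r c; simp [finishA, runH]; split <;> simp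
  | cons x xs ih =>
    intro r c
    simp only [List.foldl_cons, runH]
    by_cases hx : x = player
    · simp only [if_pos hx, ih]
    · simp only [if_neg hx]
      rw [ih]
      split <;> simp

theorem runH_run (player : Int) (xs : List Int) : ∀ (c : Int),
    runH player c xs =
      (if c + ((xs.takeWhile (fun y => y = player)).length : Int) > 1
       then [c + ((xs.takeWhile (fun y => y = player)).length : Int)] else [])
      ++ runH player 0 (xs.drop (xs.takeWhile (fun y => y = player)).length) := by
  induction xs with
  | nil => intro c; simp [runH]
  | cons x xs ih =>
    intro c
    by_cases hx : x = player
    · simp only [runH, if_pos hx, List.takeWhile_cons, decide_eq_true hx, if_true,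
        List.length_cons, List.drop_succ_cons]
      rw [ih (c + 1)]
      have e : c + 1 + ((xs.takeWhile (fun y => y = player)).length : Int)
          = c + (((xs.takeWhile (fun y => y = player)).length + 1 : Nat) : Int) := by
        push_cast; ring
      rw [e]
    · have hd : (decide (x = player)) = false := by simp [hx]
      simp only [List.takeWhile_cons, hd]
      simp [runH, hx]

theorem altInner_eq (arr : List Int) (player : Int) (j : Nat) :
    altInner arr player j = j + ((arr.drop j).takeWhile (fun y => y = player)).length := by
  fun_induction altInner arr player j with
  | case1 j hj hx ih =>
    rw [ih, List.drop_eq_getElem_cons hj, List.takeWhile_cons, decide_eq_true hx]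
    simp; omega
  | case2 j hj hx =>
    rw [List.drop_eq_getElem_cons hj, List.takeWhile_cons]
    simp [hx]
  | case3 j hj =>
    rw [List.drop_eq_nil_of_le (by omega)]
    simp

theorem altGo_eq (arr : List Int) (player : Int) (i : Nat) (ranks : List Int) :
    altGo arr player i ranks = ranks ++ runH player 0 (arr.drop i) := by
  fun_induction altGo arr player i ranks with
  | case1 i ranks h hx ih =>
    rw [ih, List.drop_eq_getElem_cons h]
    simp only [runH, if_neg hx]
    simp
  | case2 i ranks h hx j ih =>
    simp only [not_not] at hx
    have hj : j = altInner arr player (i + 1) := rfl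
    clear_value j
    rw [hj] at ih ⊢
    simp only [dite_eq_ite] at ih
    rw [ih]
    have hinner := altInner_eq arr player (i + 1)
    rw [List.drop_eq_getElem_cons h]
    simp only [runH, if_pos hx, zero_add]
    rw [runH_run player (arr.drop (i + 1)) 1]
    have h1 : ((altInner arr player (i + 1) : Nat) : Int) - (i : Int)
        = 1 + (((arr.drop (i + 1)).takeWhile (fun y => y = player)).length : Int) := by
      rw [hinner]; push_cast; ring
    have h2 : arr.drop (altInner arr player (i + 1))
        = (arr.drop (i + 1)).drop ((arr.drop (i + 1)).takeWhile (fun y => y = player)).length := by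
      rw [hinner, List.drop_drop]
    rw [h1, h2, List.append_assoc]
  | case3 i ranks h =>
    rw [List.drop_eq_nil_of_le (by omega)]
    simp [runH]

-- ===== VERDICT (by name: the statement is the Claim_ definition above) =====
theorem rank_array_spec : Claim_equal_rank_array := by
  intro arr player _
  unfold Spec_rank_array rank_array rank_array_alt
  rw [altGo_eq]
  simp only [List.drop_zero, List.nil_append]
  rw [PySem.List.foldl_pyRange_zero_pyGetD' arr 0
    (fun (st : List Int × Int) (x : Int) =>
      if x = player then (st.1, st.2 + 1)
      else (if st.2 > 1 then st.1 ++ [st.2] else st.1, 0)) (([], 0) : List Int × Int)]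
  exact foldl_eq_runH player arr [] 0
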